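-- pv_equiv track=rewrite | github.com/Urinx/SomeCodes | Bioinformatics/genome/Replication.py | SymbolArray2
-- ===== SOURCE A (Python) =====
-- def SymbolArray2(Genome, symbol):
--     array = {}
--     n = len(Genome)
--     l = n // 2
--     array[0] = sum([1 if c == symbol else 0 for c in Genome[:l]])
--     for i in range(1, n):
--         a = 1 if Genome[i-1] == symbol else 0
--         b = 1 if Genome[(i+l-1) % n] == symbol else 0
--         array[i] = array[i-1] - a + b
--     return array
-- ===== SOURCE B (Python) =====
-- def SymbolArray2(Genome, symbol):
--     n = len(Genome)
--     l = n // 2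
--     array = {0: sum(1 for c in Genome[:l] if c == symbol)}
--     for i in range(1, n):
--         array[i] = sum(1 for j in range(l) if Genome[(i + j) % n] == symbol)
--     return array
-- ===== Notes on version B (the rewrite author's own statement) =====
-- stated objective: alternative
-- what changed: B recomputes each cyclic half-window count from scratch per index (direct count over the window) instead of A's incremental sliding-window update derived from the previous index.
import Mathlib
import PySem

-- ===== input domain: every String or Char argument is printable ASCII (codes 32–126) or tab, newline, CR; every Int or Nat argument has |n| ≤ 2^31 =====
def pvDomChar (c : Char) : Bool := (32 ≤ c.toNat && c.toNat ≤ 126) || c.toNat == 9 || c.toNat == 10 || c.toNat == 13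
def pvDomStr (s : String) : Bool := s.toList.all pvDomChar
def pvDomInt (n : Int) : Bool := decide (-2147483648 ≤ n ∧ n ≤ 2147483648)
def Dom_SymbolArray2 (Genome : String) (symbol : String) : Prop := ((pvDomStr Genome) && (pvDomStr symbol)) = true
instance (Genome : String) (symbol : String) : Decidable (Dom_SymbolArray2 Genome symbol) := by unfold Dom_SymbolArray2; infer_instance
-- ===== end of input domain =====

-- B recomputes each cyclic half-window count independently (a naive per-index recount)
-- instead of A's incremental sliding-window update; objective: alternative (same output, not faster).


-- ===== PORT A =====
-- '1 if c == symbol else 0' for a genome character c (Python compares the 1-char string c with symbol)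
def pvIndA (symbol : String) (c : Char) : Int := if [c] = symbol.toList then 1 else 0

def SymbolArray2 (Genome : String) (symbol : String) : List (Int × Int) :=
  let n : Int := PySem.Str.len Genome
  let l : Int := PySem.Int.floordiv n 2
  let cs : List Char := Genome.toList
  let d0 : PySem.Dict Int Int :=
    PySem.Dict.empty.insert 0 (((PySem.List.slice cs none (some l)).map (pvIndA symbol)).sum)
  -- key i-1 was inserted on the previous iteration, so 'array[i-1]' never raises; getD 0 is exact here
  ((PySem.List.pyRange 1 n 1).foldl
    (fun d i =>
      let a : Int := pvIndA symbol (PySem.List.pyGetD cs (i - 1) ' ')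
      let b : Int := pvIndA symbol (PySem.List.pyGetD cs (PySem.Int.mod (i + l - 1) n) ' ')
      d.insert i (d.getD (i - 1) 0 - a + b)) d0).items

-- ===== PORT B =====
-- sum(1 for j in range(l) if Genome[(i + j) % n] == symbol)
def pvWinB (Genome : String) (symbol : String) (i : Int) : Int :=
  let cs : List Char := Genome.toList
  let n : Int := PySem.Str.len Genome
  let l : Int := PySem.Int.floordiv n 2
  ((PySem.List.pyRange 0 l 1).countP
    (fun j => decide ([PySem.List.pyGetD cs (PySem.Int.mod (i + j) n) ' '] = symbol.toList)) : Int)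

def SymbolArray2_alt (Genome : String) (symbol : String) : List (Int × Int) :=
  let n : Int := PySem.Str.len Genome
  let l : Int := PySem.Int.floordiv n 2
  let d0 : PySem.Dict Int Int :=
    PySem.Dict.empty.insert 0
      (((PySem.List.slice Genome.toList none (some l)).countP
          (fun c => decide ([c] = symbol.toList)) : Int))
  ((PySem.List.pyRange 1 n 1).foldl (fun d i => d.insert i (pvWinB Genome symbol i)) d0).items

-- ===== PRECONDITION & SPEC =====
def Spec_SymbolArray2 (Genome : String) (symbol : String) (out : List (Int × Int)) : Prop := out = SymbolArray2_alt Genome symbol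
instance (Genome : String) (symbol : String) (out : List (Int × Int)) : Decidable (Spec_SymbolArray2 Genome symbol out) := by unfold Spec_SymbolArray2; infer_instance

-- ===== CLAIM (what is proved, stated in full; the proofs are below) =====
def Claim_equal_SymbolArray2 : Prop := ∀ (Genome : String) (symbol : String), Dom_SymbolArray2 Genome symbol → Spec_SymbolArray2 Genome symbol (SymbolArray2 Genome symbol)

-- ===== LEMMAS AND PROOFS =====

-- mathematical window count: symbol hits in the cyclic window of length len/2 starting at index i
def pvW (cs : List Char) (symbol : String) (i : ℕ) : Int :=
  ((List.range (cs.length / 2)).map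
    (fun j => pvIndA symbol (cs.getD ((i + j) % cs.length) ' '))).sum


lemma pvW_slide (cs : List Char) (symbol : String) (m : ℕ) (hm1 : 1 ≤ m) (hmn : m ≤ cs.length) :
    pvW cs symbol m =
      pvW cs symbol (m - 1) - pvIndA symbol (cs.getD (m - 1) ' ')
        + pvIndA symbol (cs.getD ((m - 1 + cs.length / 2) % cs.length) ' ') := by
  set n := cs.length with hn
  set l := n / 2 with hl
  set g : ℕ → Int := fun j => pvIndA symbol (cs.getD ((m - 1 + j) % n) ' ') with hg
  have h1 : ((List.range (l+1)).map g).sum = g 0 + ((List.range l).map (fun j => g (j+1))).sum := by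
    simp [List.range_succ_eq_map]; rfl
  have h2 : ((List.range (l+1)).map g).sum = ((List.range l).map g).sum + g l := by
    simp [List.range_succ]
  have hWm : pvW cs symbol m = ((List.range l).map (fun j => g (j+1))).sum := by
    unfold pvW
    congr 1
    apply List.map_congr_left
    intro j hj
    have : m + j = m - 1 + (j + 1) := by omega
    rw [hg]; simp only []; rw [this]
  have hWm1 : pvW cs symbol (m-1) = ((List.range l).map g).sum := rfl
  have hg0 : g 0 = pvIndA symbol (cs.getD (m - 1) ' ') := by
    have : (m - 1 + 0) % n = m - 1 := by
      have h1 : m - 1 < n := by omega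
      simpa using Nat.mod_eq_of_lt h1
    rw [hg]; simp only []; rw [this]
  have hgl : g l = pvIndA symbol (cs.getD ((m - 1 + l) % n) ' ') := rfl
  rw [hWm, hWm1, ← hg0, ← hgl]
  omega

lemma pvW_zero (cs : List Char) (symbol : String) :
    ((cs.take (cs.length / 2)).map (pvIndA symbol)).sum = pvW cs symbol 0 := by
  rcases Nat.eq_zero_or_pos cs.length with h | h
  · rw [List.length_eq_zero_iff] at h; subst h; rfl
  · unfold pvW
    congr 1
    have hlen : cs.length / 2 ≤ cs.length := Nat.div_le_self _ _
    have : cs.take (cs.length / 2) = (List.range (cs.length / 2)).map (fun j => cs.getD ((0 + j) % cs.length) ' ') := by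
      apply List.ext_getElem
      · simp; omega
      · intro k hk1 hk2
        simp only [List.getElem_take, List.getElem_map, List.getElem_range]
        have hk : k < cs.length := by
          have := Nat.div_le_self cs.length 2; simp at hk2; omega
        have : (0 + k) % cs.length = k := by simpa using Nat.mod_eq_of_lt hk
        rw [this, List.getD_eq_getElem]
    rw [this, List.map_map]
    rfl

lemma pvKeysNodup (m : ℕ) :
    ((0:Int) :: (List.range m).map (fun k : ℕ => ((k:Int) + 1))).Nodup := by
  refine List.nodup_cons.mpr ⟨?_, ?_⟩
  · simp; intro k hk h; omega
  · have h : Function.Injective (fun k : ℕ => ((k:Int) + 1)) := by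
      intro a b hab; simpa using hab
    exact List.Nodup.map (f := fun k : ℕ => ((k:Int) + 1)) h List.nodup_range

lemma pvWinB_eq (Genome symbol : String) (m : ℕ) :
    pvWinB Genome symbol (m : Int) = pvW Genome.toList symbol m := by
  unfold pvWinB pvW
  simp only [PySem.Str.len_eq, pvIndA]
  rw [show PySem.Int.floordiv ((Genome.toList.length : Int)) 2 = ((Genome.toList.length / 2 : ℕ) : Int) from PySem.Int.floordiv_natCast _ 2]
  rw [PySem.List.pyRange_zero_nat, List.countP_map]
  have h := PySem.List.sum_map_ite_one_zero
    (fun j : ℕ => decide ([Genome.toList.getD ((m + j) % Genome.toList.length) ' '] = symbol.toList))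
    (List.range (Genome.toList.length / 2))
  simp only [decide_eq_true_eq] at h
  rw [h]
  norm_cast
  apply List.countP_congr
  intro j hj
  have hc : ((m : Int) + (j : Int)) = ((m + j : ℕ) : Int) := by push_cast; ring
  simp only [Function.comp, hc, PySem.Int.mod_natCast, PySem.List.pyGetD_natCast]

lemma pvLoopA (cs : List Char) (symbol : String) (m : ℕ) (hm1 : 1 ≤ m) (hmn : m ≤ cs.length) :
    (PySem.List.pyRange 1 (m:Int) 1).foldl
      (fun d i =>
        d.insert i (d.getD (i - 1) 0
          - pvIndA symbol (PySem.List.pyGetD cs (i - 1) ' ')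
          + pvIndA symbol
              (PySem.List.pyGetD cs
                (PySem.Int.mod (i + (↑(cs.length / 2) : Int) - 1) (cs.length : Int)) ' ')))
      (PySem.Dict.mk [((0:Int), pvW cs symbol 0)])
    = PySem.Dict.mk (((0:Int), pvW cs symbol 0) ::
        (List.range (m - 1)).map (fun k : ℕ => (((k:Int) + 1), pvW cs symbol (k + 1)))) := by
  induction m, hm1 using Nat.le_induction with
  | base =>
    rw [show ((1:ℕ):Int) = 1 by norm_cast, PySem.List.pyRange_one_eq_nil (le_refl 1)]
    simp
  | succ m hm1 IH =>
    have hmn' : m ≤ cs.length := by omega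
    have hcast : ((m + 1 : ℕ) : Int) = (m : Int) + 1 := by push_cast; ring
    rw [hcast, PySem.List.pyRange_one_succ_right (by exact_mod_cast Nat.one_le_cast.mpr hm1),
        List.foldl_append, IH hmn']
    simp only [List.foldl_cons, List.foldl_nil]
    have hkey : ((m:Int) - 1) = (((m - 1 : ℕ)) : Int) := by
      rw [Nat.cast_sub hm1]; norm_cast
    have hnd : (PySem.Dict.mk (((0:Int), pvW cs symbol 0) ::
        (List.range (m - 1)).map (fun k : ℕ => (((k:Int) + 1), pvW cs symbol (k + 1))))).keys.Nodup := by
      simp only [PySem.Dict.keys, List.map_cons, List.map_map]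
      have : ((fun p : Int × Int => p.1) ∘ (fun k : ℕ => (((k:Int) + 1), pvW cs symbol (k + 1))))
           = (fun k : ℕ => ((k:Int) + 1)) := rfl
      rw [this]
      exact pvKeysNodup (m - 1)
    have hmem : (((m - 1 : ℕ) : Int), pvW cs symbol (m - 1)) ∈
        (PySem.Dict.mk (((0:Int), pvW cs symbol 0) ::
          (List.range (m - 1)).map (fun k : ℕ => (((k:Int) + 1), pvW cs symbol (k + 1))))).items := by
      rcases Nat.eq_or_lt_of_le hm1 with h1 | h2
      · simp [← h1]
      · refine List.mem_cons_of_mem _ (List.mem_map.mpr ⟨m - 2, List.mem_range.mpr (by omega), ?_⟩)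
        have h3 : m - 2 + 1 = m - 1 := by omega
        rw [show (((m-2:ℕ):Int) + 1) = (((m-1:ℕ)):Int) by omega, h3]
    have hgetD : (PySem.Dict.mk (((0:Int), pvW cs symbol 0) ::
        (List.range (m - 1)).map (fun k : ℕ => (((k:Int) + 1), pvW cs symbol (k + 1))))).getD
          ((m:Int) - 1) 0 = pvW cs symbol (m - 1) := by
      rw [hkey]; exact PySem.Dict.getD_of_mem_items _ hmem hnd 0
    have hcont : (PySem.Dict.mk (((0:Int), pvW cs symbol 0) ::
        (List.range (m - 1)).map (fun k : ℕ => (((k:Int) + 1), pvW cs symbol (k + 1))))).contains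
          ((m:Int)) = false := by
      rw [PySem.Dict.contains_eq_decide_mem_keys]
      simp only [PySem.Dict.keys, List.map_cons, List.map_map, decide_eq_false_iff_not]
      intro hmem'
      rcases List.mem_cons.mp hmem' with h | h
      · omega
      · rcases List.mem_map.mp h with ⟨k, hk, hk2⟩
        simp only [Function.comp] at hk2
        have := List.mem_range.mp hk
        omega
    apply PySem.Dict.ext
    rw [PySem.Dict.items_insert_of_not_contains _ _ hcont]
    rw [hgetD]
    have ha : PySem.List.pyGetD cs ((m:Int) - 1) ' ' = cs.getD (m - 1) ' ' := by
      rw [hkey, PySem.List.pyGetD_natCast]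
    have hbidx : ((m:Int) + (↑(cs.length / 2) : Int) - 1) = (((m - 1 + cs.length / 2 : ℕ)) : Int) := by
      push_cast [Nat.cast_sub hm1]; ring
    have hb : PySem.List.pyGetD cs
        (PySem.Int.mod ((m:Int) + (↑(cs.length / 2) : Int) - 1) (cs.length : Int)) ' '
        = cs.getD ((m - 1 + cs.length / 2) % cs.length) ' ' := by
      rw [hbidx, PySem.Int.mod_natCast, PySem.List.pyGetD_natCast]
    rw [ha, hb, ← pvW_slide cs symbol m hm1 hmn']
    have hr : List.range (m + 1 - 1) = List.range (m - 1) ++ [m - 1] := by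
      rw [show m + 1 - 1 = (m - 1) + 1 by omega, List.range_succ]
    rw [hr, List.map_append]
    have hlast : (fun k : ℕ => (((k:Int) + 1), pvW cs symbol (k + 1))) (m - 1)
        = (((m:ℕ):Int), pvW cs symbol m) := by
      simp only
      rw [show m - 1 + 1 = m by omega, show (((m-1:ℕ):Int) + 1) = ((m:ℕ):Int) by omega]
    simp only [List.map_cons, List.map_nil, List.cons_append, hlast]

theorem SymbolArray2_main (Genome symbol : String) :
    SymbolArray2 Genome symbol = SymbolArray2_alt Genome symbol := by
  have hfd : PySem.Int.floordiv ((Genome.toList.length : ℕ) : Int) 2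
      = ((Genome.toList.length / 2 : ℕ) : Int) := by
    exact_mod_cast PySem.Int.floordiv_natCast Genome.toList.length 2
  have hbase : ((PySem.List.slice Genome.toList none (some ((Genome.toList.length / 2 : ℕ) : Int))).map
        (pvIndA symbol)).sum = pvW Genome.toList symbol 0 := by
    rw [PySem.List.slice_to_natCast, pvW_zero]
  have hbaseB : (((PySem.List.slice Genome.toList none (some ((Genome.toList.length / 2 : ℕ) : Int))).countP
        (fun c => decide ([c] = symbol.toList)) : ℕ) : Int) = pvW Genome.toList symbol 0 := by
    rw [PySem.List.slice_to_natCast, ← pvW_zero]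
    rw [← PySem.List.sum_map_ite_one_zero (fun c => decide ([c] = symbol.toList))]
    congr 1
    apply List.map_congr_left
    intro c _
    simp [pvIndA]
  simp only [SymbolArray2, SymbolArray2_alt, PySem.Str.len_eq, hfd, hbase, hbaseB]
  have hd0 : (PySem.Dict.empty : PySem.Dict Int Int).insert 0 (pvW Genome.toList symbol 0)
      = PySem.Dict.mk [((0:Int), pvW Genome.toList symbol 0)] := rfl
  rw [hd0]
  rcases Nat.eq_zero_or_pos Genome.toList.length with hn | hn
  · rw [show ((Genome.toList.length : ℕ) : Int) = 0 by omega]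
    rw [PySem.List.pyRange_one_eq_nil (by norm_num)]
    rfl
  · -- A side
    rw [pvLoopA Genome.toList symbol Genome.toList.length hn (le_refl _)]
    -- B side
    rw [PySem.Dict.items_foldl_insert_fresh (PySem.List.pyRange 1 ((Genome.toList.length : ℕ) : Int) 1)
        (fun i => i) (pvWinB Genome symbol) _
        (by intro a ha
            have h1 := (PySem.List.mem_pyRange_one.mp ha).1
            rw [PySem.Dict.contains_eq_decide_mem_keys]
            simp only [PySem.Dict.keys, List.map_cons, List.map_nil, decide_eq_false_iff_not]
            intro h; simp at h; omega)
        (by simpa using PySem.List.nodup_pyRange_one 1 ((Genome.toList.length : ℕ) : Int))]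
    rw [PySem.List.pyRange_one]
    rw [show (((Genome.toList.length : ℕ) : Int) - 1).toNat = Genome.toList.length - 1 by omega]
    simp only [List.map_map, List.cons_append, List.nil_append]
    congr 1
    apply List.map_congr_left
    intro k hk
    have hc : ((1:Int) + (k:Int)) = (((k+1 : ℕ)) : Int) := by push_cast; ring
    simp only [Function.comp, hc, pvWinB_eq]
    norm_cast

-- ===== VERDICT (by name: the statement is the Claim_ definition above) =====
theorem SymbolArray2_spec : Claim_equal_SymbolArray2 := by
  intro Genome symbol _
  unfold Spec_SymbolArray2
  exact SymbolArray2_main Genome symbol
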